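-- pv_equiv track=rewrite | github.com/Markyneos/LabprogramacaoCC2Mb | 1B/exercicios/lista1/8.py | e_matriz_esparsa
-- ===== SOURCE A (Python) =====
-- def e_matriz_esparsa(matriz):
--   zeros = 0
--   outro = 0
--   for i in range(len(matriz)):
--     for j in range(len(matriz[i])):
--       if matriz[i][j] == 0:
--         zeros += 1
--       else:
--         outro += 1
--   return zeros > outro
-- ===== SOURCE B (Python) =====
-- def e_matriz_esparsa(matriz):
--   # Stable-sort the flattened matrix with zeros first, then test the middle
--   # element: zeros are a strict majority iff the element at index n//2 is 0.
--   flat = sorted((x for row in matriz for x in row), key=lambda x: 0 if x == 0 else 1)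
--   if not flat:
--     return False
--   return flat[len(flat) // 2] == 0
-- ===== Notes on version B (the rewrite author's own statement) =====
-- stated objective: alternative
-- what changed: Instead of counting zeros vs non-zeros with two parallel counters, B stable-sorts the flattened matrix with zeros first and tests whether the middle element (index n//2) is zero - a selection/median formulation of the strict-majority test.
import Mathlib
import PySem

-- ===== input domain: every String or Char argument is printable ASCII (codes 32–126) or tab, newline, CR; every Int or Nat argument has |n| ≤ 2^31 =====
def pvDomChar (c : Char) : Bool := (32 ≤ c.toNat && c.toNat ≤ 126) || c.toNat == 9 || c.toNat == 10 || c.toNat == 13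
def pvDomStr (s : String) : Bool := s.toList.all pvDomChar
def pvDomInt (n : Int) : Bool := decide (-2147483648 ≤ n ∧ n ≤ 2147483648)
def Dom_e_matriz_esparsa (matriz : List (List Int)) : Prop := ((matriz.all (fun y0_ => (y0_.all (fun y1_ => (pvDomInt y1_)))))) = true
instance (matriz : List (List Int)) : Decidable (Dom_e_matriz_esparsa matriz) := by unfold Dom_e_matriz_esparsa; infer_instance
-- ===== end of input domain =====

-- B replaces A's two parallel counters by a selection formulation: stable-sort the
-- flattened matrix zeros-first and test the middle element; objective: alternative.

-- ===== PORT A =====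
def e_matriz_esparsa (matriz : List (List Int)) : Bool :=
  let st : Int × Int :=
    (PySem.List.pyRange 0 (PySem.List.len matriz) 1).foldl
      (fun zo i =>
        let row := PySem.List.pyGetD matriz i []
        (PySem.List.pyRange 0 (PySem.List.len row) 1).foldl
          (fun zo j =>
            if PySem.List.pyGetD row j 0 == 0 then (zo.1 + 1, zo.2) else (zo.1, zo.2 + 1))
          zo)
      (0, 0)
  decide (st.1 > st.2)

-- ===== PORT B =====
def e_matriz_esparsa_alt (matriz : List (List Int)) : Bool :=
  let flat := PySem.List.sorted (matriz.flatMap (fun row => row))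
    (fun x => if x == 0 then (0 : Int) else 1)
  if flat = [] then false
  -- flat[len(flat)//2]: the index len/2 is nonnegative and < length here, so
  -- List.getD with Nat division is exact for Python's flat[len(flat) // 2].
  else decide (flat.getD (flat.length / 2) 0 = 0)

-- ===== PRECONDITION & SPEC =====
def Spec_e_matriz_esparsa (matriz : List (List Int)) (out : Bool) : Prop := out = e_matriz_esparsa_alt matriz
instance (matriz : List (List Int)) (out : Bool) : Decidable (Spec_e_matriz_esparsa matriz out) := by unfold Spec_e_matriz_esparsa; infer_instance

-- ===== CLAIM (what is proved, stated in full; the proofs are below) =====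
def Claim_equal_e_matriz_esparsa : Prop := ∀ (matriz : List (List Int)), Dom_e_matriz_esparsa matriz → Spec_e_matriz_esparsa matriz (e_matriz_esparsa matriz)

-- ===== LEMMAS AND PROOFS =====

-- A's inner loop over one row adds the row's zero-count / non-zero-count.
theorem pv_inner_row (row : List Int) (z o : Int) :
    row.foldl (fun (zo : Int × Int) x => if x == 0 then (zo.1 + 1, zo.2) else (zo.1, zo.2 + 1)) (z, o)
      = (z + (row.count 0 : Int), o + ((row.length : Int) - (row.count 0 : Int))) := by
  induction row generalizing z o with
  | nil => simp
  | cons x t ih =>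
    simp only [List.foldl_cons]
    by_cases hx : x = 0
    · subst hx
      rw [if_pos (by simp), ih]
      have hc : (0 :: t).count 0 = t.count 0 + 1 := by simp
      rw [hc, List.length_cons]
      simp only [Prod.mk.injEq]
      constructor <;> (push_cast; ring)
    · rw [if_neg (by simp [hx]), ih]
      have hc : (x :: t).count 0 = t.count 0 := by simp [hx]
      rw [hc, List.length_cons]
      simp only [Prod.mk.injEq]
      constructor <;> (push_cast; try ring)

-- A's outer loop accumulates the per-row contributions.
theorem pv_outer (matriz : List (List Int)) (z o : Int) :
    matriz.foldl
      (fun (zo : Int × Int) row =>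
        row.foldl (fun (zo : Int × Int) x => if x == 0 then (zo.1 + 1, zo.2) else (zo.1, zo.2 + 1)) zo)
      (z, o)
      = (z + (matriz.map (fun row => (row.count 0 : Int))).sum,
         o + ((matriz.map (fun row => (row.length : Int))).sum
              - (matriz.map (fun row => (row.count 0 : Int))).sum)) := by
  induction matriz generalizing z o with
  | nil => simp
  | cons r t ih =>
    simp only [List.foldl_cons, List.map_cons, List.sum_cons]
    rw [pv_inner_row, ih]
    simp only [Prod.mk.injEq]
    constructor <;> ring

-- A equals the counting form: zeros > total - zeros on the flattened matrix.
theorem pv_A_count (matriz : List (List Int)) :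
    e_matriz_esparsa matriz
      = decide ((matriz.map (fun row => (row.count 0 : Int))).sum
          > (matriz.map (fun row => (row.length : Int))).sum
            - (matriz.map (fun row => (row.count 0 : Int))).sum) := by
  unfold e_matriz_esparsa
  rw [show (PySem.List.len matriz) = ((matriz.length : Int)) from by simp,
      PySem.List.foldl_pyRange_zero_pyGetD' matriz ([] : List Int)
        (fun (zo : Int × Int) row =>
          (PySem.List.pyRange 0 (PySem.List.len row) 1).foldl
            (fun zo j =>
              if PySem.List.pyGetD row j 0 == 0 then (zo.1 + 1, zo.2) else (zo.1, zo.2 + 1))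
            zo)
        ((0, 0) : Int × Int)]
  have hrows : matriz.foldl
      (fun (zo : Int × Int) row =>
        (PySem.List.pyRange 0 (PySem.List.len row) 1).foldl
          (fun zo j =>
            if PySem.List.pyGetD row j 0 == 0 then (zo.1 + 1, zo.2) else (zo.1, zo.2 + 1))
          zo)
      ((0, 0) : Int × Int)
      = matriz.foldl
          (fun (zo : Int × Int) row =>
            row.foldl (fun (zo : Int × Int) x => if x == 0 then (zo.1 + 1, zo.2) else (zo.1, zo.2 + 1)) zo)
          ((0, 0) : Int × Int) := by
    apply PySem.List.foldl_congr_mem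
    intro zo row _
    rw [show (PySem.List.len row) = ((row.length : Int)) from by simp,
        PySem.List.foldl_pyRange_zero_pyGetD' row (0 : Int)
          (fun (zo : Int × Int) x => if x == 0 then (zo.1 + 1, zo.2) else (zo.1, zo.2 + 1)) zo]
  rw [hrows, pv_outer]
  simp

-- The zeros-first comparator used by B's sort.
def pvBef (a b : Int) : Bool :=
  decide ((if a == 0 then (0 : Int) else 1) < (if b == 0 then (0 : Int) else 1))

-- Inserting 0 into (replicate m 0 ++ T), all of T non-zero, lands after the zeros.
theorem pv_ins0 (m : Nat) (T : List Int) (hT : ∀ y ∈ T, y ≠ 0) :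
    PySem.List.insertBy pvBef 0 (List.replicate m 0 ++ T)
      = List.replicate (m + 1) 0 ++ T := by
  induction m with
  | zero =>
    cases T with
    | nil => simp [PySem.List.insertBy]
    | cons h t =>
      have hh : h ≠ 0 := hT h (by simp)
      simp [PySem.List.insertBy, pvBef, hh]
  | succ k ih =>
    have : PySem.List.insertBy pvBef 0 (List.replicate (k + 1) 0 ++ T)
        = 0 :: PySem.List.insertBy pvBef 0 (List.replicate k 0 ++ T) := by
      simp [List.replicate_succ, PySem.List.insertBy, pvBef]
    rw [this, ih]
    simp [List.replicate_succ]

-- Inserting a non-zero into (replicate m 0 ++ T), all of T non-zero, lands at the end.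
theorem pv_ins1 (x : Int) (hx : x ≠ 0) (m : Nat) (T : List Int) (hT : ∀ y ∈ T, y ≠ 0) :
    PySem.List.insertBy pvBef x (List.replicate m 0 ++ T)
      = List.replicate m 0 ++ (T ++ [x]) := by
  induction m with
  | zero =>
    simp only [List.replicate_zero, List.nil_append]
    induction T with
    | nil => simp [PySem.List.insertBy]
    | cons h t iht =>
      have hh : h ≠ 0 := hT h (by simp)
      have hrec := iht (fun y hy => hT y (by simp [hy]))
      by_cases hx0 : x = 0
      · exact absurd hx0 hx
      · simp [PySem.List.insertBy, pvBef, hx0, hh] at hrec ⊢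
        exact hrec
  | succ k ih =>
    have : PySem.List.insertBy pvBef x (List.replicate (k + 1) 0 ++ T)
        = 0 :: PySem.List.insertBy pvBef x (List.replicate k 0 ++ T) := by
      simp [List.replicate_succ, PySem.List.insertBy, pvBef, hx]
    rw [this, ih]
    simp [List.replicate_succ]

-- B's insertion-sort fold keeps the zeros-first partitioned shape.
theorem pv_foldl_sort (xs : List Int) (m : Nat) (T : List Int) (hT : ∀ y ∈ T, y ≠ 0) :
    xs.foldl (fun acc x => PySem.List.insertBy pvBef x acc) (List.replicate m 0 ++ T)
      = List.replicate (m + xs.count 0) 0 ++ (T ++ xs.filter (fun x => !(x == 0))) := by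
  induction xs generalizing m T with
  | nil => simp
  | cons x t ih =>
    simp only [List.foldl_cons]
    by_cases hx : x = 0
    · subst hx
      rw [pv_ins0 m T hT, ih (m + 1) T hT]
      simp only [List.count_cons_self, List.filter_cons]
      norm_num
      omega
    · have hT' : ∀ y ∈ T ++ [x], y ≠ 0 := by
        intro y hy
        rcases List.mem_append.mp hy with h | h
        · exact hT y h
        · simp at h
          simpa [h] using hx
      rw [pv_ins1 x hx m T hT, ih m (T ++ [x]) hT']
      have hc : (x :: t).count 0 = t.count 0 := by simp [hx]
      simp [hc, hx, List.append_assoc]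

-- Characterisation of B's sorted list: all the zeros, then the non-zeros in order.
theorem pv_sorted_char (xs : List Int) :
    PySem.List.sorted xs (fun x => if x == 0 then (0 : Int) else 1)
      = List.replicate (xs.count 0) 0 ++ xs.filter (fun x => !(x == 0)) := by
  rw [PySem.List.sorted_eq_foldl_insertBy]
  have h := pv_foldl_sort xs 0 [] (by simp)
  unfold pvBef at h
  simpa using h

-- The flattened zero-count and length as sums over rows (Int-valued).
theorem pv_count_flat (matriz : List (List Int)) :
    (((matriz.flatMap (fun row => row)).count 0 : Int))
      = (matriz.map (fun row => (row.count 0 : Int))).sum := by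
  induction matriz with
  | nil => simp
  | cons r t ih =>
    simp only [List.flatMap_cons, List.count_append, List.map_cons, List.sum_cons]
    push_cast
    rw [ih]

theorem pv_len_flat (matriz : List (List Int)) :
    (((matriz.flatMap (fun row => row)).length : Int))
      = (matriz.map (fun row => (row.length : Int))).sum := by
  induction matriz with
  | nil => simp
  | cons r t ih =>
    simp only [List.flatMap_cons, List.length_append, List.map_cons, List.sum_cons]
    push_cast
    rw [ih]

-- ===== VERDICT (by name: the statement is the Claim_ definition above) =====
theorem e_matriz_esparsa_spec : Claim_equal_e_matriz_esparsa := by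
  intro matriz _
  unfold Spec_e_matriz_esparsa
  rw [pv_A_count]
  unfold e_matriz_esparsa_alt
  set xs := matriz.flatMap (fun row => row) with hxs
  rw [← pv_count_flat, ← pv_len_flat]
  simp only [pv_sorted_char]
  set z := xs.count 0 with hz
  set N := xs.filter (fun x => !(x == 0)) with hN
  have hlen : xs.length = z + N.length := by
    rw [hz, hN, List.count_eq_countP]
    have := List.length_eq_countP_add_countP (p := fun x => x == 0) (l := xs)
    simpa [List.countP_eq_length_filter] using this
  have hNne : ∀ y ∈ N, y ≠ 0 := by
    intro y hy
    have := (List.mem_filter.mp (hN ▸ hy)).2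
    simpa using this
  by_cases hempty : List.replicate z 0 ++ N = ([] : List Int)
  · have hz0 : z = 0 ∧ N = [] := by
      have h := List.append_eq_nil_iff.mp hempty
      refine ⟨?_, h.2⟩
      have := congrArg List.length h.1
      simpa using this
    rw [if_pos hempty]
    have hN0 : N.length = 0 := by rw [hz0.2]; simp
    have hx0 : xs.length = 0 := by omega
    have hzz : z = 0 := hz0.1
    have hne : ¬ ((z : Int) > (xs.length : Int) - (z : Int)) := by omega
    exact decide_eq_false hne
  · rw [if_neg hempty]
    have hlpos : 0 < z + N.length := by
      rcases Nat.eq_zero_or_pos (z + N.length) with h | h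
      · exfalso
        apply hempty
        have : z = 0 ∧ N.length = 0 := by omega
        simp [this.1, List.length_eq_zero_iff.mp this.2]
      · exact h
    have hlenrep : (List.replicate z 0 ++ N).length = z + N.length := by simp
    set i := (List.replicate z 0 ++ N).length / 2 with hi
    have hiLt : i < z + N.length := by rw [hi, hlenrep]; omega
    have hget : (List.replicate z 0 ++ N).getD i 0 = 0 ↔ i < z := by
      constructor
      · intro h
        by_contra hge
        push_neg at hge
        have h2 : i - z < N.length := by omega
        have : (List.replicate z 0 ++ N).getD i 0 = N[i - z] := by
          rw [List.getD_eq_getElem _ _ (by simpa [hlenrep] using hiLt)]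
          rw [List.getElem_append_right (by simpa using hge)]
          simp
        rw [this] at h
        exact hNne _ (List.getElem_mem h2) h
      · intro h
        rw [List.getD_eq_getElem _ _ (by simpa [hlenrep] using hiLt)]
        rw [List.getElem_append_left (by simpa using h)]
        simp
    have hi2 : i = (z + N.length) / 2 := by rw [hi, hlenrep]
    rw [hlen]
    push_cast
    rw [decide_eq_decide]
    constructor
    · intro h
      rw [hget, hi2]
      omega
    · intro h
      rw [hget, hi2] at h
      omega
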